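-- pv_equiv track=rewrite | github.com/Leejaehyub1/Coding_Test | 백준/[2579번]_계단 오르기.py | solution
-- ===== SOURCE A (Python) =====
-- def solution(stair, N):
--     DP = [0] * (N + 1)
--     for i in range(1, N+1):
--         if(i == 1):
--             DP[i] = stair[i]
--
--         elif(i == 2):
--             DP[i] = stair[i-1] + stair[i]
--
--         elif(i == 3):
--             DP[i] = max(stair[i-2], stair[i-1]) + stair[i]
--
--         else:
--             DP[i] = max(DP[i-2], DP[i-3] + stair[i-1]) + stair[i]
--
--     return DP[N]
-- ===== SOURCE B (Python) =====
-- def solution(stair, N):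
--     # Complement formulation: maximize taken stairs == total of stairs 1..N minus
--     # the minimum possible sum of SKIPPED stairs.  A valid climb skips stairs so
--     # that skipped positions are never adjacent (no jump of 3) and never 3 apart
--     # twice without... concretely: consecutive skipped positions differ by 2 or 3,
--     # so m[i] = stair[i] + min over previous skip, folded below.
--     if N <= 0:
--         return 0
--     total = sum(stair[1:N + 1])
--     if N <= 2:
--         return total
--     # m2, m1, m0 = minimal skipped sums M[i-2], M[i-1], M[i] for a climb ending on stair i
--     m2, m1, m0 = 0, 0, min(stair[1], stair[2])
--     for i in range(4, N + 1):
--         m2, m1, m0 = m1, m0, min(m1 + stair[i - 1], m2 + stair[i - 2])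
--     return total - m0
-- ===== Notes on version B (the rewrite author's own statement) =====
-- stated objective: alternative
-- what changed: B solves the complement problem: it sums stairs 1..N and subtracts the minimal achievable sum of SKIPPED stairs (a min-DP where consecutive skips are 2 or 3 apart), instead of A's forward array DP maximizing the taken sum.
-- outside the precondition, e.g. on solution([0, 5, 7], -1): A raises IndexError, B returns 0; on solution([0, 5], 2): A raises IndexError, B returns 5
import Mathlib
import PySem

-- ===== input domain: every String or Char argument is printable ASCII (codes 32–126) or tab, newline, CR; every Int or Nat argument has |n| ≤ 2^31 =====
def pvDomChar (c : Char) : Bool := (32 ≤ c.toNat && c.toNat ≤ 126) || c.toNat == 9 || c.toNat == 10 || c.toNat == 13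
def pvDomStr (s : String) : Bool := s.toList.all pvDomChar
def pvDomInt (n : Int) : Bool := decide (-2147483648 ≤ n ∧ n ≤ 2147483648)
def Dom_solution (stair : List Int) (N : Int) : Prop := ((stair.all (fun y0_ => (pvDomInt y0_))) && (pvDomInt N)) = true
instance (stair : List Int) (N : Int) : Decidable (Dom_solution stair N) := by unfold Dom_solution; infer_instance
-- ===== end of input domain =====

-- B solves the complement problem: it subtracts the minimal achievable sum of SKIPPED
-- stairs from the total of stairs 1..N, instead of maximizing the taken sum directly
-- (alternative algorithm, same cost). Equivalence is about the return value.

-- ===== PORT A =====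
-- loop body of A's 'for i in range(1, N+1)' (DP[i] = … in each branch)
def pvAstep (stair : List Int) (DP : List Int) (i : Int) : List Int :=
  if i = 1 then
    PySem.List.pySetD DP i (PySem.List.pyGetD stair i 0)
  else if i = 2 then
    PySem.List.pySetD DP i (PySem.List.pyGetD stair (i - 1) 0 + PySem.List.pyGetD stair i 0)
  else if i = 3 then
    PySem.List.pySetD DP i
      (max (PySem.List.pyGetD stair (i - 2) 0) (PySem.List.pyGetD stair (i - 1) 0) +
        PySem.List.pyGetD stair i 0)
  else
    PySem.List.pySetD DP i
      (max (PySem.List.pyGetD DP (i - 2) 0)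
          (PySem.List.pyGetD DP (i - 3) 0 + PySem.List.pyGetD stair (i - 1) 0) +
        PySem.List.pyGetD stair i 0)

def solution (stair : List Int) (N : Int) : Int :=
  let DP0 : List Int := List.replicate (N + 1).toNat 0
  let DP := (PySem.List.pyRange 1 (N + 1)).foldl (pvAstep stair) DP0
  PySem.List.pyGetD DP N 0

-- ===== PORT B =====
-- loop body of B's 'for i in range(4, N+1)' over the rolling minimal-skip state (m2, m1, m0)
def pvBstep (stair : List Int) (acc : Int × Int × Int) (i : Int) : Int × Int × Int :=
  match acc with
  | (m2, m1, m0) =>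
      (m1, m0,
        min (m1 + PySem.List.pyGetD stair (i - 1) 0) (m2 + PySem.List.pyGetD stair (i - 2) 0))

def solution_alt (stair : List Int) (N : Int) : Int :=
  if N ≤ 0 then 0
  else
    let total := (PySem.List.slice stair (some 1) (some (N + 1))).sum
    if N ≤ 2 then total
    else
      let init : Int × Int × Int :=
        (0, 0, min (PySem.List.pyGetD stair 1 0) (PySem.List.pyGetD stair 2 0))
      total - ((PySem.List.pyRange 4 (N + 1)).foldl (pvBstep stair) init).2.2

-- ===== PRECONDITION & SPEC =====
-- Pre_ excludes exactly the inputs on which the Python A raises IndexError: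
-- negative N (DP is then empty and DP[N] fails) and, for N ≥ 1, a stair list
-- shorter than N+1 (stair[i] fails for some i in 1..N).
def Pre_solution (stair : List Int) (N : Int) : Prop :=
  0 ≤ N ∧ (N = 0 ∨ N + 1 ≤ (stair.length : Int))
instance (stair : List Int) (N : Int) : Decidable (Pre_solution stair N) := by
  unfold Pre_solution; infer_instance

def pvWitness_solution : List Int × Int := ([0, 10, 20, 15, 25], 4)

def Spec_solution (stair : List Int) (N : Int) (out : Int) : Prop := out = solution_alt stair N
instance (stair : List Int) (N : Int) (out : Int) : Decidable (Spec_solution stair N out) := by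
  unfold Spec_solution; infer_instance

-- ===== CLAIM (what is proved, stated in full; the proofs are below) =====
def Claim_equal_solution : Prop := ∀ (stair : List Int) (N : Int), Dom_solution stair N → Pre_solution stair N → Spec_solution stair N (solution stair N)

-- ===== LEMMAS AND PROOFS =====

-- the value of A: pvF stair n is DP[n] of A's recurrence
def pvF (st : List Int) : Nat → Int
  | 0 => 0
  | 1 => st.getD 1 0
  | 2 => st.getD 1 0 + st.getD 2 0
  | 3 => max (st.getD 1 0) (st.getD 2 0) + st.getD 3 0
  | (q + 4) =>
      max (pvF st (q + 2)) (pvF st (q + 1) + st.getD (q + 3) 0) + st.getD (q + 4) 0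

theorem pv_getD_set (l : List Int) (j k : Nat) (v : Int) (hj : j < l.length) :
    (l.set j v).getD k 0 = if k = j then v else l.getD k 0 := by
  by_cases h : k = j
  · subst h; simp [List.getD, hj]
  · have hne : j ≠ k := fun hh => h hh.symm
    simp [List.getD, hne]
    intro hh; exact absurd hh h

theorem pvAstep_eq (stair DPm : List Int) (n m : Nat) (hm : m + 1 ≤ n)
    (hval : ∀ k : Nat, k ≤ n → DPm.getD k 0 = if k ≤ m then pvF stair k else 0) :
    pvAstep stair DPm ((m : Int) + 1) = DPm.set (m + 1) (pvF stair (m + 1)) := by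
  unfold pvAstep
  rcases m with _ | _ | _ | p
  · norm_num [PySem.List.pySetD_of_nonneg, PySem.List.pyGetD_ofNat', pvF]
  · norm_num [PySem.List.pySetD_of_nonneg, PySem.List.pyGetD_ofNat', pvF]
    rfl
  · norm_num [PySem.List.pySetD_of_nonneg, PySem.List.pyGetD_ofNat', pvF]
    rfl
  · have hi : ((p + 3 : Nat) : Int) + 1 = ((p + 4 : Nat) : Int) := by push_cast; ring
    rw [hi]
    rw [if_neg (by omega), if_neg (by omega), if_neg (by omega)]
    have h2 : ((p + 4 : Nat) : Int) - 2 = ((p + 2 : Nat) : Int) := by push_cast; ring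
    have h3 : ((p + 4 : Nat) : Int) - 3 = ((p + 1 : Nat) : Int) := by push_cast; ring
    have h1 : ((p + 4 : Nat) : Int) - 1 = ((p + 3 : Nat) : Int) := by push_cast; ring
    rw [h2, h3, h1, PySem.List.pySetD_natCast, PySem.List.pyGetD_natCast,
      PySem.List.pyGetD_natCast, PySem.List.pyGetD_natCast, PySem.List.pyGetD_natCast,
      hval (p + 2) (by omega), hval (p + 1) (by omega),
      if_pos (by omega), if_pos (by omega)]
    rfl

theorem pvA_inv (stair : List Int) (n : Nat) :
    ∀ m : Nat, m ≤ n →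
      (((PySem.List.pyRange 1 ((m : Int) + 1)).foldl (pvAstep stair)
          (List.replicate (n + 1) 0)).length = n + 1 ∧
        ∀ k : Nat, k ≤ n →
          ((PySem.List.pyRange 1 ((m : Int) + 1)).foldl (pvAstep stair)
              (List.replicate (n + 1) 0)).getD k 0 =
            if k ≤ m then pvF stair k else 0) := by
  intro m
  induction m with
  | zero =>
    intro _
    rw [show ((0 : Nat) : Int) + 1 = 1 by norm_num, PySem.List.pyRange_one_eq_nil le_rfl]
    simp only [List.foldl_nil, List.length_replicate, true_and]
    intro k hk
    rw [List.getD_replicate _ (by omega)]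
    by_cases h : k ≤ 0
    · have hk0 : k = 0 := by omega
      subst hk0; simp [pvF]
    · simp [h]
  | succ m ih =>
    intro hm
    obtain ⟨hlen, hval⟩ := ih (by omega)
    have hcast : ((m + 1 : Nat) : Int) + 1 = ((m : Int) + 1) + 1 := by push_cast; ring
    rw [hcast, PySem.List.pyRange_one_succ_right (by omega), List.foldl_append,
      List.foldl_cons, List.foldl_nil,
      pvAstep_eq stair _ n m hm hval]
    constructor
    · rw [List.length_set, hlen]
    · intro k hk
      rw [pv_getD_set _ _ _ _ (by omega)]
      by_cases hkm : k = m + 1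
      · subst hkm; simp
      · rw [if_neg hkm, hval k hk]
        by_cases h1 : k ≤ m
        · rw [if_pos h1, if_pos (by omega)]
        · rw [if_neg h1, if_neg (by omega)]

theorem pvA_eq (stair : List Int) (n : Nat) :
    solution stair (n : Int) = pvF stair n := by
  unfold solution
  obtain ⟨hlen, hval⟩ := pvA_inv stair n n le_rfl
  have hc : ((n : Int) + 1).toNat = n + 1 := by omega
  simp only [hc, PySem.List.pyGetD_natCast]
  rw [hval n le_rfl, if_pos le_rfl]

-- prefix total: pvT st n = stair[1] + … + stair[n]
def pvT (st : List Int) : Nat → Int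
  | 0 => 0
  | (n + 1) => pvT st n + st.getD (n + 1) 0

-- minimal skipped sum: pvM st n = pvT st n - pvF st n, by its own min-recurrence
def pvM (st : List Int) : Nat → Int
  | 0 => 0
  | 1 => 0
  | 2 => 0
  | 3 => min (st.getD 1 0) (st.getD 2 0)
  | (q + 4) =>
      min (pvM st (q + 2) + st.getD (q + 3) 0) (pvM st (q + 1) + st.getD (q + 2) 0)

-- the complement identity linking A's max-recurrence to B's min-recurrence
theorem pv_id (st : List Int) : ∀ n : Nat, pvF st n + pvM st n = pvT st n := by
  intro n
  induction n using Nat.strong_induction_on with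
  | _ n ih =>
    match n with
    | 0 => simp [pvF, pvM, pvT]
    | 1 => simp [pvF, pvM, pvT]
    | 2 => simp only [pvF, pvM, pvT]; ring
    | 3 =>
      simp only [pvF, pvM, pvT, max_def, min_def]
      norm_num
      split_ifs <;> omega
    | (q + 4) =>
      have h1 := ih (q + 2) (by omega)
      have h2 := ih (q + 1) (by omega)
      simp only [pvF, pvM, pvT, max_def, min_def, Nat.add_assoc] at h1 h2 ⊢
      norm_num at h1 h2 ⊢
      split_ifs <;> omega

theorem pv_take_sum (st : List Int) :
    ∀ n : Nat, n + 1 ≤ st.length → (List.take n (List.drop 1 st)).sum = pvT st n := by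
  intro n
  induction n with
  | zero => intro _; simp [pvT]
  | succ n ih =>
    intro h
    have hn : n < (List.drop 1 st).length := by simp; omega
    rw [List.take_add_one, List.sum_append, ih (by omega)]
    rw [List.getElem?_eq_getElem hn, List.getElem_drop]
    simp only [pvT, Option.toList_some, List.sum_cons, List.sum_nil, add_zero]
    rw [List.getD_eq_getElem st 0 (by omega)]
    congr 2
    omega

theorem pvB_loop (st : List Int) :
    ∀ (len j : Nat), 3 ≤ j →
      (PySem.List.pyRange ((j : Int) + 1) ((j : Int) + 1 + len)).foldl (pvBstep st)
          (pvM st (j - 2), pvM st (j - 1), pvM st j) =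
        (pvM st (j + len - 2), pvM st (j + len - 1), pvM st (j + len)) := by
  intro len
  induction len with
  | zero =>
    intro j hj
    rw [show ((j : Int) + 1 + (0 : Nat)) = (j : Int) + 1 by push_cast; ring,
      PySem.List.pyRange_one_eq_nil le_rfl]
    simp
  | succ len ih =>
    intro j hj
    rw [PySem.List.pyRange_one_cons (by push_cast; omega), List.foldl_cons]
    have hstep :
        pvBstep st (pvM st (j - 2), pvM st (j - 1), pvM st j) ((j : Int) + 1) =
          (pvM st (j + 1 - 2), pvM st (j + 1 - 1), pvM st (j + 1)) := by
      unfold pvBstep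
      obtain ⟨q, rfl⟩ : ∃ q, j = q + 3 := ⟨j - 3, by omega⟩
      have e1 : ((q + 3 : Nat) : Int) + 1 - 1 = ((q + 3 : Nat) : Int) := by push_cast; ring
      have e2 : ((q + 3 : Nat) : Int) + 1 - 2 = ((q + 2 : Nat) : Int) := by push_cast; ring
      rw [e1, e2, PySem.List.pyGetD_natCast, PySem.List.pyGetD_natCast]
      have e3 : q + 3 - 2 = q + 1 := by omega
      have e4 : q + 3 - 1 = q + 2 := by omega
      have e5 : q + 3 + 1 - 2 = q + 2 := by omega
      have e6 : q + 3 + 1 - 1 = q + 3 := by omega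
      have e7 : q + 3 + 1 = q + 4 := by omega
      rw [e3, e4, e5, e6, e7]
      show (pvM st (q + 2), pvM st (q + 3),
        min (pvM st (q + 2) + st.getD (q + 3) 0) (pvM st (q + 1) + st.getD (q + 2) 0)) = _
      rfl
    rw [hstep]
    have := ih (j + 1) (by omega)
    have ec : ((j + 1 : Nat) : Int) + 1 = (j : Int) + 1 + 1 := by push_cast; ring
    have ec2 : ((j : Int) + 1 + 1) + (len : Nat) = (j : Int) + 1 + ((len + 1 : Nat) : Int) := by
      push_cast; ring
    rw [ec, ec2] at this
    rw [this]
    have e8 : j + 1 + len = j + (len + 1) := by omega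
    rw [e8]

theorem pvB_eq (stair : List Int) (n : Nat)
    (h : n = 0 ∨ (n : Int) + 1 ≤ (stair.length : Int)) :
    solution_alt stair (n : Int) = pvF stair n := by
  rcases n with _ | _ | _ | m
  · simp [solution_alt, pvF]
  · -- n = 1
    have hlen : 1 + 1 ≤ stair.length := by rcases h with h | h <;> omega
    simp only [solution_alt]
    rw [if_neg (by norm_num), if_pos (by norm_num)]
    rw [PySem.List.slice_toNat stair (by norm_num) (by norm_num)]
    norm_num
    rw [show Int.toNat 2 - 1 = 1 from rfl, ← List.drop_one, pv_take_sum stair 1 hlen]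
    have := pv_id stair 1
    simp only [pvM] at this
    omega
  · -- n = 2
    have hlen : 2 + 1 ≤ stair.length := by rcases h with h | h <;> omega
    simp only [solution_alt]
    rw [if_neg (by norm_num), if_pos (by norm_num)]
    rw [PySem.List.slice_toNat stair (by norm_num) (by norm_num)]
    norm_num
    rw [show Int.toNat 3 - 1 = 2 from rfl, ← List.drop_one, pv_take_sum stair 2 hlen]
    have := pv_id stair 2
    simp only [pvM] at this
    omega
  · -- n = m + 3 ≥ 3
    have hlen : (m + 3) + 1 ≤ stair.length := by rcases h with h | h <;> omega
    simp only [solution_alt]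
    rw [if_neg (by push_cast; omega), if_neg (by push_cast; omega)]
    rw [PySem.List.slice_toNat stair (by norm_num) (by push_cast; omega)]
    have hb : (((m + 3 : Nat) : Int) + 1).toNat = m + 4 := by omega
    rw [hb, show ((1 : Int)).toNat = 1 from rfl, show m + 4 - 1 = m + 3 from by omega,
      pv_take_sum stair (m + 3) hlen]
    have hinit :
        ((0 : Int), (0 : Int),
          min (PySem.List.pyGetD stair 1 0) (PySem.List.pyGetD stair 2 0)) =
          (pvM stair (3 - 2), pvM stair (3 - 1), pvM stair 3) := by
      norm_num [PySem.List.pyGetD_ofNat', pvM]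
    have hr : (4 : Int) = ((3 : Nat) : Int) + 1 := by norm_num
    have hr2 : ((m + 3 : Nat) : Int) + 1 = ((3 : Nat) : Int) + 1 + (m : Nat) := by
      push_cast; ring
    rw [hinit, hr, hr2, pvB_loop stair m 3 le_rfl]
    show pvT stair (m + 3) - pvM stair (3 + m) = pvF stair (m + 1 + 1 + 1)
    rw [show 3 + m = m + 3 from by omega, show m + 1 + 1 + 1 = m + 3 from by omega]
    have := pv_id stair (m + 3)
    omega

-- ===== VERDICT (by name: the statement is the Claim_ definition above) =====
theorem solution_spec : Claim_equal_solution := by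
  intro stair N _ hpre
  obtain ⟨h0, hlen⟩ := hpre
  obtain ⟨n, rfl⟩ : ∃ n : Nat, N = (n : Int) := ⟨N.toNat, (Int.toNat_of_nonneg h0).symm⟩
  unfold Spec_solution
  rw [pvA_eq, pvB_eq]
  rcases hlen with h | h
  · left; exact_mod_cast h
  · right; exact h
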